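-- pv_equiv track=rewrite | github.com/Venue6603/ANTAgent | AntAgent/autodev/diff_doctor.py | _validate_min_context
-- ===== SOURCE A (Python) =====
-- from typing import Tuple
--
-- def _validate_min_context(diff_text: str, min_context: int = 1) -> Tuple[bool, str]:
--     if min_context <= 0:
--         return True, ""
--     lines = diff_text.splitlines()
--     in_hunk = False
--     ctx = 0
--     any_hunk = False
--     for ln in lines:
--         if ln.startswith("@@"):
--             any_hunk = True
--             if in_hunk and ctx < min_context:
--                 return False, f"Hunk has only {ctx} context lines (< {min_context})."
--             in_hunk = True
--             ctx = 0
--             continue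
--         if not in_hunk:
--             continue
--         if ln.startswith(" "):
--             ctx += 1
--     if not any_hunk:
--         return False, "No @@ hunks found."
--     if in_hunk and ctx < min_context:
--         return False, f"Final hunk has only {ctx} context lines (< {min_context})."
--     return True, ""
-- ===== SOURCE B (Python) =====
-- def _validate_min_context(diff_text: str, min_context: int = 1):
--     if min_context <= 0:
--         return True, ""
--     # One pass to collect the context-line count of each hunk, then judge them.
--     counts = []
--     for ln in diff_text.splitlines():
--         if ln.startswith("@@"):
--             counts.append(0)
--         elif counts and ln.startswith(" "):
--             counts[-1] += 1
--     if not counts: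
--         return False, "No @@ hunks found."
--     last = len(counts) - 1
--     for i, ctx in enumerate(counts):
--         if ctx < min_context:
--             kind = "Final hunk" if i == last else "Hunk"
--             return False, f"{kind} has only {ctx} context lines (< {min_context})."
--     return True, ""
-- ===== Notes on version B (the rewrite author's own statement) =====
-- stated objective: simpler
-- what changed: A interleaves hunk detection and per-hunk counting in one stateful scan with in_hunk/ctx/any_hunk flags and two separately-placed failure checks; B decomposes into two phases: first collect the context-line count of every hunk, then judge the counts in order, choosing the Final-hunk wording when the failing hunk is the last one.
import Mathlib
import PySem

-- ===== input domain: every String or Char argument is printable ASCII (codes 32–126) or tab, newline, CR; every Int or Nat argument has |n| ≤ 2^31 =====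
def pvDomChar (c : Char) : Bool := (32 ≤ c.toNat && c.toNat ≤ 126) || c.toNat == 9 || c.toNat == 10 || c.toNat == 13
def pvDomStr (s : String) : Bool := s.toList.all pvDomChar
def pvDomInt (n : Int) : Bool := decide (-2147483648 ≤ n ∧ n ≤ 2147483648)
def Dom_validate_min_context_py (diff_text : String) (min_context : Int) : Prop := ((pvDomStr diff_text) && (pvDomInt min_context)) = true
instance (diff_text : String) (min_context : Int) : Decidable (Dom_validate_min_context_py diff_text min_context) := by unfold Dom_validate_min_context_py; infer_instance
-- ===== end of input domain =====

-- B replaces A's single stateful scan (in_hunk/ctx/any_hunk flags with two differently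
-- worded exit checks) by a two-phase decomposition: collect per-hunk context counts, then
-- judge them in order; objective: simpler.

-- ===== PORT A =====
-- the for-loop of A with its three state variables, plus the post-loop checks
def pvALoop (min_context : Int) : List String → Bool → Int → Bool → Bool × String
  | [], in_hunk, ctx, any_hunk =>
      if !any_hunk then (false, "No @@ hunks found.")
      else if in_hunk && decide (ctx < min_context) then
        (false, "Final hunk has only " ++ PySem.Int.toStr ctx ++ " context lines (< "
          ++ PySem.Int.toStr min_context ++ ").")
      else (true, "")
  | ln :: rest, in_hunk, ctx, any_hunk =>
      if PySem.Str.startswith ln "@@" then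
        if in_hunk && decide (ctx < min_context) then
          (false, "Hunk has only " ++ PySem.Int.toStr ctx ++ " context lines (< "
            ++ PySem.Int.toStr min_context ++ ").")
        else pvALoop min_context rest true 0 true
      else if !in_hunk then pvALoop min_context rest in_hunk ctx any_hunk
      else if PySem.Str.startswith ln " " then pvALoop min_context rest in_hunk (ctx + 1) any_hunk
      else pvALoop min_context rest in_hunk ctx any_hunk

def validate_min_context_py (diff_text : String) (min_context : Int) : Bool × String :=
  if min_context ≤ 0 then (true, "")
  else pvALoop min_context (PySem.Str.splitlines diff_text) false 0 false

-- ===== PORT B =====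
-- B's first loop (counts.append / counts[-1] += 1); the accumulator keeps the list
-- reversed (head = counts[-1]) and is reversed once at the end, as usual for a foldl port
def pvBStep (acc : List Int) (ln : String) : List Int :=
  if PySem.Str.startswith ln "@@" then 0 :: acc
  else if !acc.isEmpty && PySem.Str.startswith ln " " then
    match acc with
    | c :: t => (c + 1) :: t
    | [] => acc
  else acc

-- B's second loop: judge the counts in order; 'Final hunk' wording on the last one
def pvBJudge (min_context : Int) : List Int → Bool × String
  | [] => (true, "")
  | [ctx] =>
      if decide (ctx < min_context) then
        (false, "Final hunk has only " ++ PySem.Int.toStr ctx ++ " context lines (< "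
          ++ PySem.Int.toStr min_context ++ ").")
      else (true, "")
  | ctx :: rest =>
      if decide (ctx < min_context) then
        (false, "Hunk has only " ++ PySem.Int.toStr ctx ++ " context lines (< "
          ++ PySem.Int.toStr min_context ++ ").")
      else pvBJudge min_context rest

def validate_min_context_py_alt (diff_text : String) (min_context : Int) : Bool × String :=
  if min_context ≤ 0 then (true, "")
  else
    let counts := ((PySem.Str.splitlines diff_text).foldl pvBStep []).reverse
    if counts.isEmpty then (false, "No @@ hunks found.")
    else pvBJudge min_context counts

-- ===== PRECONDITION & SPEC =====
def Spec_validate_min_context_py (diff_text : String) (min_context : Int) (out : Bool × String) : Prop := out = validate_min_context_py_alt diff_text min_context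
instance (diff_text : String) (min_context : Int) (out : Bool × String) : Decidable (Spec_validate_min_context_py diff_text min_context out) := by unfold Spec_validate_min_context_py; infer_instance

-- ===== CLAIM (what is proved, stated in full; the proofs are below) =====
def Claim_equal_validate_min_context_py : Prop := ∀ (diff_text : String) (min_context : Int), Dom_validate_min_context_py diff_text min_context → Spec_validate_min_context_py diff_text min_context (validate_min_context_py diff_text min_context)

-- ===== LEMMAS AND PROOFS =====

-- recursive (in-order) specification of B's counting loop, once inside the first hunk
def pvCRec (c : Int) : List String → List Int
  | [] => [c]
  | ln :: rest =>
      if PySem.Str.startswith ln "@@" then c :: pvCRec 0 rest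
      else if PySem.Str.startswith ln " " then pvCRec (c + 1) rest
      else pvCRec c rest

theorem pvCRec_ne_nil (c : Int) (ls : List String) : pvCRec c ls ≠ [] := by
  induction ls generalizing c with
  | nil => simp [pvCRec]
  | cons ln rest ih => simp only [pvCRec]; split_ifs <;> simp_all

theorem pvBStep_foldl (ls : List String) (c : Int) (acc : List Int) :
    (ls.foldl pvBStep (c :: acc)).reverse = acc.reverse ++ pvCRec c ls := by
  induction ls generalizing c acc with
  | nil => simp [pvCRec]
  | cons ln rest ih =>
    cases h1 : PySem.Chars.startswith ln.toList ['@', '@'] with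
    | true =>
      have hs : pvBStep (c :: acc) ln = 0 :: c :: acc := by simp [pvBStep, h1]
      have hc : pvCRec c (ln :: rest) = c :: pvCRec 0 rest := by simp [pvCRec, h1]
      rw [List.foldl_cons, hs, ih, hc]; simp
    | false =>
      cases h2 : PySem.Chars.startswith ln.toList [' '] with
      | true =>
        have hs : pvBStep (c :: acc) ln = (c + 1) :: acc := by simp [pvBStep, h1, h2]
        have hc : pvCRec c (ln :: rest) = pvCRec (c + 1) rest := by simp [pvCRec, h1, h2]
        rw [List.foldl_cons, hs, ih, hc]
      | false =>
        have hs : pvBStep (c :: acc) ln = c :: acc := by simp [pvBStep, h1, h2]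
        have hc : pvCRec c (ln :: rest) = pvCRec c rest := by simp [pvCRec, h1, h2]
        rw [List.foldl_cons, hs, ih, hc]

-- B's counting loop before the first '@@' line is seen (accumulator still empty)
theorem pvBStep_foldl_nil (ls : List String) :
    (ls.foldl pvBStep []).reverse =
      (match ls with
       | [] => ([] : List Int)
       | ln :: rest => if PySem.Str.startswith ln "@@" then pvCRec 0 rest
                       else (rest.foldl pvBStep []).reverse) := by
  match ls with
  | [] => simp
  | ln :: rest =>
    cases h1 : PySem.Chars.startswith ln.toList ['@', '@'] with
    | true =>
      have hs : pvBStep [] ln = [0] := by simp [pvBStep, h1]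
      rw [List.foldl_cons, hs]
      have := pvBStep_foldl rest 0 []
      simp only [List.reverse_nil, List.nil_append] at this
      simp [this, h1]
    | false =>
      have hs : pvBStep [] ln = [] := by simp [pvBStep, h1]
      rw [List.foldl_cons, hs]
      simp [h1]

-- A's loop, once inside the first hunk, judges exactly the counts pvCRec produces
theorem pvALoop_in_hunk (mc : Int) (ls : List String) (c : Int) :
    pvALoop mc ls true c true = pvBJudge mc (pvCRec c ls) := by
  induction ls generalizing c with
  | nil => simp [pvALoop, pvCRec, pvBJudge]
  | cons ln rest ih =>
    cases h1 : PySem.Chars.startswith ln.toList ['@', '@'] with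
    | true =>
      obtain ⟨d, t, hdt⟩ := List.exists_cons_of_ne_nil (pvCRec_ne_nil 0 rest)
      have hc : pvCRec c (ln :: rest) = c :: d :: t := by simp [pvCRec, h1, hdt]
      by_cases h2 : c < mc
      · have ha : pvALoop mc (ln :: rest) true c true =
            (false, "Hunk has only " ++ PySem.Int.toStr c ++ " context lines (< "
              ++ PySem.Int.toStr mc ++ ").") := by simp [pvALoop, h1, h2]
        rw [ha, hc]; simp [pvBJudge, h2]
      · have ha : pvALoop mc (ln :: rest) true c true = pvALoop mc rest true 0 true := by
          simp [pvALoop, h1, h2]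
        rw [ha, hc, ih 0, hdt]; simp [pvBJudge, h2]
    | false =>
      cases h2 : PySem.Chars.startswith ln.toList [' '] with
      | true =>
        have ha : pvALoop mc (ln :: rest) true c true = pvALoop mc rest true (c + 1) true := by
          simp [pvALoop, h1, h2]
        have hc : pvCRec c (ln :: rest) = pvCRec (c + 1) rest := by simp [pvCRec, h1, h2]
        rw [ha, hc, ih (c + 1)]
      | false =>
        have ha : pvALoop mc (ln :: rest) true c true = pvALoop mc rest true c true := by
          simp [pvALoop, h1, h2]
        have hc : pvCRec c (ln :: rest) = pvCRec c rest := by simp [pvCRec, h1, h2]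
        rw [ha, hc, ih c]

-- A's loop from its initial state
theorem pvALoop_start (mc : Int) (ls : List String) :
    pvALoop mc ls false 0 false =
      (if ((ls.foldl pvBStep []).reverse).isEmpty then (false, "No @@ hunks found.")
       else pvBJudge mc ((ls.foldl pvBStep []).reverse)) := by
  induction ls with
  | nil => simp [pvALoop]
  | cons ln rest ih =>
    rw [pvBStep_foldl_nil]
    cases h1 : PySem.Chars.startswith ln.toList ['@', '@'] with
    | true =>
      have hne := pvCRec_ne_nil 0 rest
      have ha : pvALoop mc (ln :: rest) false 0 false = pvALoop mc rest true 0 true := by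
        simp [pvALoop, h1]
      rw [ha, pvALoop_in_hunk]
      simp [h1, List.isEmpty_iff, hne]
    | false =>
      have ha : pvALoop mc (ln :: rest) false 0 false = pvALoop mc rest false 0 false := by
        simp [pvALoop, h1]
      rw [ha, ih]
      simp [h1]

-- ===== VERDICT (by name: the statement is the Claim_ definition above) =====
theorem validate_min_context_py_spec : Claim_equal_validate_min_context_py := by
  intro diff_text min_context _
  unfold Spec_validate_min_context_py validate_min_context_py validate_min_context_py_alt
  split_ifs with h
  · rfl
  · exact pvALoop_start min_context (PySem.Str.splitlines diff_text)
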